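-- pv_equiv track=rewrite | github.com/krnets/codewars-practice | 7kyu/Mutate My Strings/kata.py | mutate_my_strings
-- ===== SOURCE A (Python) =====
-- def mutate_my_strings(s1, s2):
--     res = [s1]
--     chars = list(s1)
--
--     for i, c in enumerate(s2):
--         if chars[i] != c:
--             chars[i] = c
--             res.append("".join(chars))
--
--     return "\n".join(res) + "\n"
-- ===== SOURCE B (Python) =====
-- def mutate_my_strings(s1, s2):
--     out = s1 + "\n"
--     for i in range(len(s2)):
--         if s1[i] != s2[i]:
--             out += s2[:i + 1] + s1[i + 1:] + "\n"
--     return out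
-- ===== Notes on version B (the rewrite author's own statement) =====
-- stated objective: simpler
-- what changed: B drops the mutable character buffer and the result list: each line is built directly from slices of the two originals (s2[:i+1] + s1[i+1:]) and appended, newline-terminated, to a single output string, so no running buffer state is threaded between iterations and no final join is needed.
import Mathlib
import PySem

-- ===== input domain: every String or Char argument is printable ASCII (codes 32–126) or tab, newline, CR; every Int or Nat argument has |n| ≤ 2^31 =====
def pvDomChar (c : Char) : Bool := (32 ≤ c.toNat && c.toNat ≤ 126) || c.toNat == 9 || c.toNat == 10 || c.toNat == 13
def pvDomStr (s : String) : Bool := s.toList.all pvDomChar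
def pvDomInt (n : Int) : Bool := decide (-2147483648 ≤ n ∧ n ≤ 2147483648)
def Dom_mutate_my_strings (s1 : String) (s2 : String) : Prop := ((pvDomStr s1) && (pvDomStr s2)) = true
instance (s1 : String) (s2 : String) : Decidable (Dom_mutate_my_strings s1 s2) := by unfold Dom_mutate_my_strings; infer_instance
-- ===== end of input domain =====

-- B drops A's mutable character buffer and result list: each line is built directly from
-- slices of the two originals and appended, newline-terminated, to a single output string
-- (objective: simpler).

-- ===== PORT A =====
-- A: keeps a mutable char buffer `chars` and a list `res` of snapshots; joins at the end.
-- "".join(chars) on a list of single characters is String.mk of the char list (exact).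
def mutate_my_strings (s1 : String) (s2 : String) : String :=
  let st := (PySem.List.enumerate s2.toList 0).foldl
    (fun (st : List Char × List (List Char)) (ic : Int × Char) =>
      if PySem.List.pyGet? st.1 ic.1 ≠ some ic.2 then
        let chars' := PySem.List.pySetD st.1 ic.1 ic.2
        (chars', st.2 ++ [chars'])
      else st)
    (s1.toList, [s1.toList])
  String.mk (PySem.Chars.join ['\n'] st.2 ++ ['\n'])

-- ===== PORT B =====
-- B: one output string accumulator; each line is s2[:i+1] + s1[i+1:] + "\n" from slices.
def mutate_my_strings_alt (s1 : String) (s2 : String) : String :=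
  let l1 := s1.toList
  let l2 := s2.toList
  let out := (PySem.List.pyRange 0 (l2.length : Int) 1).foldl
    (fun (out : List Char) (i : Int) =>
      if PySem.List.pyGet? l1 i ≠ PySem.List.pyGet? l2 i then
        out ++ PySem.List.slice l2 none (some (i + 1)) ++ PySem.List.slice l1 (some (i + 1)) none ++ ['\n']
      else out)
    (l1 ++ ['\n'])
  String.mk out

-- ===== PRECONDITION & SPEC =====
-- A indexes chars (= list(s1)) at every position of s2, so it raises IndexError exactly
-- when s2 is longer than s1; Pre_ excludes exactly those inputs.
def Pre_mutate_my_strings (s1 : String) (s2 : String) : Prop :=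
  s2.toList.length ≤ s1.toList.length
instance (s1 : String) (s2 : String) : Decidable (Pre_mutate_my_strings s1 s2) := by
  unfold Pre_mutate_my_strings; infer_instance

def pvWitness_mutate_my_strings : String × String := ("abc", "axy")

def Spec_mutate_my_strings (s1 : String) (s2 : String) (out : String) : Prop :=
  out = mutate_my_strings_alt s1 s2
instance (s1 : String) (s2 : String) (out : String) : Decidable (Spec_mutate_my_strings s1 s2 out) := by
  unfold Spec_mutate_my_strings; infer_instance

-- ===== CLAIM (what is proved, stated in full; the proofs are below) =====
def Claim_equal_mutate_my_strings : Prop :=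
  ∀ (s1 : String) (s2 : String), Dom_mutate_my_strings s1 s2 →
    Pre_mutate_my_strings s1 s2 → Spec_mutate_my_strings s1 s2 (mutate_my_strings s1 s2)

-- ===== LEMMAS AND PROOFS =====

-- The common value: the list of changed lines from position k on.
def pvLines (l1 l2 : List Char) (k : Nat) : List (List Char) :=
  if h : k < l2.length then
    (if l1[k]? ≠ l2[k]? then [l2.take (k + 1) ++ l1.drop (k + 1)] else [])
      ++ pvLines l1 l2 (k + 1)
  else []
termination_by l2.length - k

theorem pvLines_stop (l1 l2 : List Char) (k : Nat) (h : l2.length ≤ k) :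
    pvLines l1 l2 k = [] := by
  rw [pvLines]; simp [Nat.not_lt.mpr h]

theorem pv_buffer_step (l1 l2 : List Char) (k : Nat)
    (hk : k < l2.length) (hle : l2.length ≤ l1.length) :
    (l2.take k ++ l1.drop k).set k l2[k] = l2.take (k + 1) ++ l1.drop (k + 1) := by
  have hk1 : k < l1.length := lt_of_lt_of_le hk hle
  have htk : (l2.take k).length = k := List.length_take_of_le (le_of_lt hk)
  have hd : l1.drop k = l1[k] :: l1.drop (k + 1) := List.drop_eq_getElem_cons hk1
  have ht : l2.take (k + 1) = l2.take k ++ [l2[k]] := by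
    rw [List.take_succ, List.getElem?_eq_getElem hk]; rfl
  rw [List.set_append]
  simp only [htk, lt_irrefl, if_false, Nat.sub_self]
  rw [hd, List.set_cons_zero, ht, List.append_assoc, List.singleton_append]

theorem pv_buffer_eq (l1 l2 : List Char) (k : Nat)
    (hk : k < l2.length) (hle : l2.length ≤ l1.length) (heq : l1[k]? = l2[k]?) :
    l2.take k ++ l1.drop k = l2.take (k + 1) ++ l1.drop (k + 1) := by
  have hk1 : k < l1.length := lt_of_lt_of_le hk hle
  have hd : l1.drop k = l1[k] :: l1.drop (k + 1) := List.drop_eq_getElem_cons hk1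
  have ht : l2.take (k + 1) = l2.take k ++ [l2[k]] := by
    rw [List.take_succ, List.getElem?_eq_getElem hk]; rfl
  have hv : l1[k] = l2[k] := by
    have := heq
    rw [List.getElem?_eq_getElem hk1, List.getElem?_eq_getElem hk] at this
    exact Option.some.inj this
  rw [hd, ht, hv, List.append_assoc, List.singleton_append]

theorem pv_get_buffer (l1 l2 : List Char) (k : Nat)
    (hk : k < l2.length) (hle : l2.length ≤ l1.length) :
    (l2.take k ++ l1.drop k)[k]? = l1[k]? := by
  have hk1 : k < l1.length := lt_of_lt_of_le hk hle
  have htk : (l2.take k).length = k := List.length_take_of_le (le_of_lt hk)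
  rw [List.getElem?_append_right (by omega)]
  rw [htk, Nat.sub_self, List.getElem?_drop, Nat.add_zero]

-- A's loop from position k: buffer is l2.take k ++ l1.drop k, appends exactly pvLines k.
theorem pv_foldA (l1 l2 : List Char) (hle : l2.length ≤ l1.length) :
    ∀ (k : Nat) (res : List (List Char)), k ≤ l2.length →
    ((PySem.List.enumerate (l2.drop k) (k : Int)).foldl
      (fun (st : List Char × List (List Char)) (ic : Int × Char) =>
        if PySem.List.pyGet? st.1 ic.1 ≠ some ic.2 then
          let chars' := PySem.List.pySetD st.1 ic.1 ic.2
          (chars', st.2 ++ [chars'])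
        else st)
      (l2.take k ++ l1.drop k, res)).2 = res ++ pvLines l1 l2 k := by
  intro k
  induction' hm : l2.length - k with m ih generalizing k
  · intro res hk
    have hk' : k = l2.length := by omega
    subst hk'
    simp [PySem.List.enumerate_nil, pvLines_stop l1 l2 _ (le_refl _)]
  · intro res hk
    have hklt : k < l2.length := by omega
    have hdrop : l2.drop k = l2[k] :: l2.drop (k + 1) := List.drop_eq_getElem_cons hklt
    rw [hdrop, PySem.List.enumerate_cons, List.foldl_cons]
    have hget : PySem.List.pyGet? (l2.take k ++ l1.drop k) ((k : Nat) : Int) = l1[k]? := by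
      rw [PySem.List.pyGet?_natCast, pv_get_buffer l1 l2 k hklt hle]
    have hset : PySem.List.pySetD (l2.take k ++ l1.drop k) ((k : Nat) : Int) l2[k]
        = l2.take (k + 1) ++ l1.drop (k + 1) := by
      rw [PySem.List.pySetD_natCast, pv_buffer_step l1 l2 k hklt hle]
    have hcast : ((k : Int) + 1) = (((k + 1 : Nat)) : Int) := by push_cast; ring
    rw [pvLines, dif_pos hklt]
    by_cases hne : l1[k]? = l2[k]?
    · rw [if_neg]
      · rw [hcast, pv_buffer_eq l1 l2 k hklt hle hne,
          ih (k + 1) (by omega) res (by omega)]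
        simp [hne]
      · simp only [hget, ne_eq, not_not]
        simpa [List.getElem?_eq_getElem hklt] using hne
    · rw [if_pos]
      · simp only [hset, hcast]
        rw [ih (k + 1) (by omega) (res ++ [l2.take (k + 1) ++ l1.drop (k + 1)]) (by omega)]
        simp [hne]
      · simp only [hget, ne_eq]
        simpa [List.getElem?_eq_getElem hklt] using hne

-- B's loop from position k: appends the newline-terminated lines of pvLines k.
theorem pv_foldB (l1 l2 : List Char) (hle : l2.length ≤ l1.length) :
    ∀ (k : Nat) (out : List Char), k ≤ l2.length →
    (PySem.List.pyRange (k : Int) (l2.length : Int) 1).foldl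
      (fun (out : List Char) (i : Int) =>
        if PySem.List.pyGet? l1 i ≠ PySem.List.pyGet? l2 i then
          out ++ PySem.List.slice l2 none (some (i + 1)) ++ PySem.List.slice l1 (some (i + 1)) none ++ ['\n']
        else out)
      out = out ++ (pvLines l1 l2 k).flatMap (· ++ ['\n']) := by
  intro k
  induction' hm : l2.length - k with m ih generalizing k
  · intro out hk
    have hk' : k = l2.length := by omega
    subst hk'
    rw [PySem.List.pyRange_one_eq_nil (le_refl _), List.foldl_nil,
      pvLines_stop l1 l2 _ (le_refl _)]
    simp
  · intro out hk
    have hklt : k < l2.length := by omega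
    rw [PySem.List.pyRange_one_cons (by exact_mod_cast hklt), List.foldl_cons]
    have hcast : ((k : Int) + 1) = (((k + 1 : Nat)) : Int) := by push_cast; ring
    have hsl2 : PySem.List.slice l2 none (some ((k : Int) + 1)) = l2.take (k + 1) := by
      rw [hcast, PySem.List.slice_to_natCast]
    have hsl1 : PySem.List.slice l1 (some ((k : Int) + 1)) none = l1.drop (k + 1) := by
      rw [hcast, PySem.List.slice_from_natCast]
    rw [pvLines, dif_pos hklt]
    by_cases hne : l1[k]? = l2[k]?
    · rw [if_neg]
      · rw [hcast, ih (k + 1) (by omega) out (by omega)]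
        simp [hne]
      · simp only [PySem.List.pyGet?_natCast, ne_eq, not_not]
        simpa [List.getElem?_eq_getElem hklt] using hne
    · rw [if_pos]
      · rw [hsl2, hsl1, hcast, ih (k + 1) (by omega) _ (by omega)]
        simp [hne]
      · simp only [PySem.List.pyGet?_natCast, ne_eq]
        simpa [List.getElem?_eq_getElem hklt] using hne

-- "\n".join(a :: M) + "\n" is a + "\n" followed by every line of M with "\n" appended.
theorem pv_join_newlines (M : List (List Char)) :
    ∀ (a : List Char),
    PySem.Chars.join ['\n'] (a :: M) ++ ['\n'] = a ++ '\n' :: M.flatMap (· ++ ['\n']) := by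
  induction M with
  | nil => intro a; simp [PySem.Chars.join_singleton]
  | cons b M' ih =>
    intro a
    rw [PySem.Chars.join_cons_cons, List.append_assoc, List.append_assoc, ih b]
    simp

-- ===== VERDICT (by name: the statement is the Claim_ definition above) =====
theorem mutate_my_strings_spec : Claim_equal_mutate_my_strings := by
  intro s1 s2 _ hpre
  unfold Spec_mutate_my_strings mutate_my_strings mutate_my_strings_alt
  have hle : s2.toList.length ≤ s1.toList.length := hpre
  have hA := pv_foldA s1.toList s2.toList hle 0 [s1.toList] (Nat.zero_le _)
  have hB := pv_foldB s1.toList s2.toList hle 0 (s1.toList ++ ['\n']) (Nat.zero_le _)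
  simp only [List.drop_zero, List.take_zero, List.nil_append, Nat.cast_zero] at hA hB
  simp only [hA, hB, List.singleton_append, pv_join_newlines]
  simp
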